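-- pv_equiv track=rewrite | github.com/the0nlyWyvern/Frequent-itemset-Apriori-Algorithm- | utility.py | itemset_names_isValid
-- ===== SOURCE A (Python) =====
-- def count_frequency(lst: list) -> dict:
--     freq = {}
--     for item in lst:
--         if (item in freq):
--             freq[item] += 1
--         else:
--             freq[item] = 1
--     return freq
--
-- def itemset_names_isValid(names: list):
--     combine = list(names[0] + names[1])
--     freq = count_frequency(combine)
--
--     sum = 0
--     for key, value in freq.items():
--         assert value <= 2, "Error: Invalid names! "
--         if value == 1:
--             sum += 1
--     if sum == 2:
--         combine = [key for key, _ in freq.items()]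
--         combine.sort()
--         combine = tuple(combine)
--         return combine
--     return None
-- ===== SOURCE B (Python) =====
-- def itemset_names_isValid(names: list):
--     # sort-then-scan: group equal adjacent items of the sorted concatenation
--     combine = sorted(names[0] + names[1])
--     groups = []
--     i = 0
--     n = len(combine)
--     while i < n:
--         j = i + 1
--         while j < n and combine[j] == combine[i]:
--             j += 1
--         groups.append((combine[i], j - i))
--         i = j
--     assert all(c <= 2 for _, c in groups), "Error: Invalid names! "
--     if sum(1 for _, c in groups if c == 1) == 2:
--         return tuple(k for k, _ in groups)
--     return None
-- ===== Notes on version B (the rewrite author's own statement) =====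
-- stated objective: alternative
-- what changed: Replaces A's dict-based frequency counting (build a counter dict, then iterate its items) with sort-then-scan: sort the concatenation once and group equal adjacent elements in a single index sweep, reading run heads and run lengths directly, so no dictionary is built and the final sort of the keys disappears.
import Mathlib
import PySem

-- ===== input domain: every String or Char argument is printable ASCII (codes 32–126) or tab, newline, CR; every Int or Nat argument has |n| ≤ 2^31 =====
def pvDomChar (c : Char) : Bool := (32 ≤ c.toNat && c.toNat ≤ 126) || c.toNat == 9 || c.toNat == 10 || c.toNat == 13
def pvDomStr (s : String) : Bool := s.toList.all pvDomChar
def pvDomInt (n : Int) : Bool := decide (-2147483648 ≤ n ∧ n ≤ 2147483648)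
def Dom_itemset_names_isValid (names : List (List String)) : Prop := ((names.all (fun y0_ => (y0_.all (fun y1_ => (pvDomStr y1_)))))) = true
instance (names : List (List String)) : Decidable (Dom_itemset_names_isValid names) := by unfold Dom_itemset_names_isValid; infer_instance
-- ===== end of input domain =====

-- B replaces A's dict-based frequency counter (plus a final sort of the keys) by one sort of
-- the concatenation and a single grouping sweep over adjacent equal elements (objective: alternative).

-- ===== PORT A =====
-- helper count_frequency: the loop 'if item in freq: freq[item] += 1 else: freq[item] = 1'
def pvCountFrequency (lst : List String) : PySem.Dict String Int :=
  lst.foldl (fun d item => if d.contains item then d.modify item 0 (· + 1) else d.insert item 1)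
    PySem.Dict.empty

def itemset_names_isValid (names : List (List String)) : Option (List String) :=
  match PySem.List.pyGet? names 0, PySem.List.pyGet? names 1 with
  | some n0, some n1 =>
    let combine := n0 ++ n1
    let freq := pvCountFrequency combine
    -- the loop over freq.items(): assert value <= 2, count values equal to 1
    match freq.items.foldl
        (fun acc kv => acc.bind (fun s => if kv.2 ≤ 2 then some (if kv.2 == 1 then s + 1 else s) else none))
        (some (0 : Int)) with
    | none => none  -- Python raises AssertionError "Error: Invalid names! " here; outside Pre_
    | some s =>
      if s == 2 then
        some (PySem.List.sorted (freq.items.map (fun kv => kv.1)) (fun x => x) false)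
      else none
  | _, _ => none  -- Python raises IndexError here; outside Pre_

-- ===== PORT B =====
-- the while-loop sweep of Source B: maximal runs of equal adjacent elements as (head, run length)
def pvGroupRuns : List String → List (String × Nat)
  | [] => []
  | x :: xs =>
    (x, (xs.takeWhile (fun y => y == x)).length + 1) :: pvGroupRuns (xs.dropWhile (fun y => y == x))
termination_by l => l.length
decreasing_by simp; exact List.length_dropWhile_le _ _

def itemset_names_isValid_alt (names : List (List String)) : Option (List String) :=
  match PySem.List.pyGet? names 0 with
  | none => none  -- Python raises IndexError here; outside Pre_
  | some n0 =>
    match PySem.List.pyGet? names 1 with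
    | none => none  -- Python raises IndexError here; outside Pre_
    | some n1 =>
      let combine := PySem.List.sorted (n0 ++ n1) (fun x => x) false
      let groups := pvGroupRuns combine
      if groups.all (fun g => g.2 ≤ 2) then
        if groups.countP (fun g => g.2 == 1) == 2 then some (groups.map (fun g => g.1)) else none
      else none  -- Python raises AssertionError "Error: Invalid names! " here; outside Pre_

-- ===== PRECONDITION & SPEC =====
-- Pre_ excludes exactly the inputs where the Python A raises: fewer than two member lists
-- (IndexError on names[1]) or some name occurring more than twice in names[0] + names[1]
-- (AssertionError "Error: Invalid names! ").
def Pre_itemset_names_isValid (names : List (List String)) : Prop :=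
  2 ≤ names.length ∧
    ∀ s ∈ names.getD 0 [] ++ names.getD 1 [], (names.getD 0 [] ++ names.getD 1 []).count s ≤ 2
instance (names : List (List String)) : Decidable (Pre_itemset_names_isValid names) := by
  unfold Pre_itemset_names_isValid; infer_instance

def pvWitness_itemset_names_isValid : List (List String) := [["a", "b"], ["b", "c"]]

def Spec_itemset_names_isValid (names : List (List String)) (out : Option (List String)) : Prop := out = itemset_names_isValid_alt names
instance (names : List (List String)) (out : Option (List String)) : Decidable (Spec_itemset_names_isValid names out) := by unfold Spec_itemset_names_isValid; infer_instance

-- ===== CLAIM (what is proved, stated in full; the proofs are below) =====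
def Claim_equal_itemset_names_isValid : Prop := ∀ (names : List (List String)), Dom_itemset_names_isValid names → Pre_itemset_names_isValid names → Spec_itemset_names_isValid names (itemset_names_isValid names)

-- ===== LEMMAS AND PROOFS =====

lemma pvModify_of_not_contains (d : PySem.Dict String Int) (x : String)
    (h : d.contains x = false) : d.modify x 0 (· + 1) = d.insert x 1 := by
  have hg : d.get? x = none := by
    rw [PySem.Dict.get?_eq_none_iff_contains]; simp [h]
  unfold PySem.Dict.modify PySem.Dict.insert
  simp [h, PySem.Dict.getD, hg]

lemma pvCountFrequency_eq_counter (lst : List String) :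
    pvCountFrequency lst = PySem.Dict.counter lst := by
  have hstep :
      (fun (d : PySem.Dict String Int) item =>
        if d.contains item then d.modify item 0 (· + 1) else d.insert item 1)
      = (fun (d : PySem.Dict String Int) x => d.modify x 0 (· + 1)) := by
    funext d x
    by_cases hc : d.contains x
    · simp [hc]
    · simp only [Bool.not_eq_true] at hc
      simp [hc, pvModify_of_not_contains d x hc]
  rw [pvCountFrequency, hstep, PySem.Dict.counter_eq_foldl]

lemma pvSumFold (ps : List (String × Int)) (s : Int) (h : ∀ p ∈ ps, p.2 ≤ 2) :
    ps.foldl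
        (fun acc kv => acc.bind (fun t => if kv.2 ≤ 2 then some (if kv.2 == 1 then t + 1 else t) else none))
        (some s)
      = some (s + ps.countP (fun p => p.2 == 1)) := by
  induction ps generalizing s with
  | nil => simp
  | cons p ps ih =>
    have hp2 : p.2 ≤ 2 := h p (by simp)
    rw [List.foldl_cons]
    simp only [Option.bind_some, if_pos hp2]
    rw [ih _ (fun q hq => h q (by simp [hq]))]
    rw [List.countP_cons]
    by_cases h1 : p.2 = 1 <;> simp [h1] <;> push_cast <;> ring

lemma pv_not_mem_drop (x : String) (xs : List String) (h : (x :: xs).Pairwise (· ≤ ·)) :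
    x ∉ xs.dropWhile (fun y => y == x) := by
  intro hx
  cases hd : xs.dropWhile (fun y => y == x) with
  | nil => simp [hd] at hx
  | cons h' t' =>
    have hne : ¬ (h' == x) = true := by
      have := List.head?_dropWhile_not (fun y => y == x) xs
      rw [hd] at this; simpa using this
    rw [hd] at hx
    have hsub : (xs.dropWhile (fun y => y == x)).Sublist xs := List.dropWhile_sublist _
    rw [hd] at hsub
    have hxle : ∀ y ∈ xs, x ≤ y := by
      intro y hy; exact (List.pairwise_cons.mp h).1 y hy
    have hx_le_h' : x ≤ h' := hxle h' (hsub.subset (by simp))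
    have hp : (h' :: t').Pairwise (· ≤ ·) := ((List.pairwise_cons.mp h).2).sublist hsub
    rcases List.mem_cons.mp hx with hx | hx
    · exact hne (by simp [hx])
    · have : h' ≤ x := (List.pairwise_cons.mp hp).1 x hx
      exact hne (by simp [le_antisymm this hx_le_h'])

lemma pv_gr_mem (l : List String) (k : String) :
    k ∈ (pvGroupRuns l).map Prod.fst ↔ k ∈ l := by
  induction l using pvGroupRuns.induct with
  | case1 => simp [pvGroupRuns]
  | case2 x xs ih =>
    rw [pvGroupRuns]
    simp only [List.map_cons, List.mem_cons, ih]
    constructor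
    · rintro (rfl | hk)
      · simp
      · have : k ∈ xs := (List.dropWhile_sublist _).subset hk
        simp [this]
    · rintro (rfl | hk)
      · left; rfl
      · by_cases hkx : k = x
        · left; exact hkx
        · right
          conv at hk => rw [← List.takeWhile_append_dropWhile (p := fun y => y == x) (l := xs)]
        
          rcases List.mem_append.mp hk with h1 | h2
          · exact absurd (by simpa using List.mem_takeWhile_imp h1) hkx
          · exact h2

lemma pv_gr_count (l : List String) (h : l.Pairwise (· ≤ ·)) :
    ∀ p ∈ pvGroupRuns l, p.2 = l.count p.1 := by
  induction l using pvGroupRuns.induct with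
  | case1 => simp [pvGroupRuns]
  | case2 x xs ih =>
    have hxd : x ∉ xs.dropWhile (fun y => y == x) := pv_not_mem_drop x xs h
    have hsplit : xs = xs.takeWhile (fun y => y == x) ++ xs.dropWhile (fun y => y == x) :=
      (List.takeWhile_append_dropWhile).symm
    have htall : ∀ y ∈ xs.takeWhile (fun y => y == x), y = x := by
      intro y hy; simpa using List.mem_takeWhile_imp hy
    have hd_pw : (xs.dropWhile (fun y => y == x)).Pairwise (· ≤ ·) :=
      ((List.pairwise_cons.mp h).2).sublist (List.dropWhile_sublist _)
    rw [pvGroupRuns]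
    intro p hp
    rcases List.mem_cons.mp hp with rfl | hp
    · -- head pair: count x l = takeWhile.length + 1
      simp only
      rw [List.count_cons_self]
      conv_rhs => rw [hsplit]
      rw [List.count_append]
      have h1 : (xs.takeWhile (fun y => y == x)).count x = (xs.takeWhile (fun y => y == x)).length := by
        rw [List.count_eq_length]
        intro b hb; exact (htall b hb).symm
      have h2 : (xs.dropWhile (fun y => y == x)).count x = 0 := List.count_eq_zero.mpr hxd
      omega
    · have := ih hd_pw p hp
      rw [this]
      have hpfst : p.1 ∈ xs.dropWhile (fun y => y == x) := by
        have : p.1 ∈ (pvGroupRuns (xs.dropWhile (fun y => y == x))).map Prod.fst :=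
          List.mem_map_of_mem hp
        exact (pv_gr_mem _ _).mp this
      have hne : p.1 ≠ x := fun he => hxd (he ▸ hpfst)
      rw [List.count_cons_of_ne hne.symm]
      conv_rhs => rw [hsplit]
      rw [List.count_append]
      have : (xs.takeWhile (fun y => y == x)).count p.1 = 0 :=
        List.count_eq_zero.mpr (fun hm => hne (htall _ hm))
      omega

lemma pv_gr_heads_lt (l : List String) (h : l.Pairwise (· ≤ ·)) :
    ((pvGroupRuns l).map Prod.fst).Pairwise (· < ·) := by
  induction l using pvGroupRuns.induct with
  | case1 => simp [pvGroupRuns]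
  | case2 x xs ih =>
    have hxd : x ∉ xs.dropWhile (fun y => y == x) := pv_not_mem_drop x xs h
    have hd_pw : (xs.dropWhile (fun y => y == x)).Pairwise (· ≤ ·) :=
      ((List.pairwise_cons.mp h).2).sublist (List.dropWhile_sublist _)
    rw [pvGroupRuns]
    simp only [List.map_cons, List.pairwise_cons]
    refine ⟨?_, ih hd_pw⟩
    intro k hk
    have hkd : k ∈ xs.dropWhile (fun y => y == x) := (pv_gr_mem _ _).mp hk
    have hkxs : k ∈ xs := (List.dropWhile_sublist _).subset hkd
    have hxk : x ≤ k := (List.pairwise_cons.mp h).1 k hkxs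
    exact lt_of_le_of_ne hxk (fun he => hxd (he ▸ hkd))

-- the two ports agree on every input admitted by Pre_
lemma pv_main (names : List (List String))
    (hlen : 2 ≤ names.length)
    (hcnt : ∀ s ∈ names.getD 0 [] ++ names.getD 1 [], (names.getD 0 [] ++ names.getD 1 []).count s ≤ 2) :
    itemset_names_isValid names = itemset_names_isValid_alt names := by
  obtain ⟨n0, n1, rest, rfl⟩ : ∃ n0 n1 rest, names = n0 :: n1 :: rest := by
    match names, hlen with
    | n0 :: n1 :: rest, _ => exact ⟨n0, n1, rest, rfl⟩
  simp only [List.getD_cons_zero, List.getD_cons_succ] at hcnt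
  set combine := n0 ++ n1 with hcomb
  set sc := PySem.List.sorted combine (fun x => x) false with hsc
  have hg0 : PySem.List.pyGet? (n0 :: n1 :: rest) 0 = some n0 := PySem.List.pyGet?_zero_cons _ _
  have hg1 : PySem.List.pyGet? (n0 :: n1 :: rest) 1 = some n1 := by
    have := PySem.List.pyGet?_ofNat (xs := n0 :: n1 :: rest) (n := 1) (by simp)
    simpa using this
  -- shared facts
  have hperm : sc.Perm combine := PySem.List.sorted_perm _ _ _
  have hsc_pw : sc.Pairwise (· ≤ ·) := PySem.List.sorted_pairwise _ _
  have hcount : ∀ k, sc.count k = combine.count k := fun k => hperm.count_eq k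
  set heads := (pvGroupRuns sc).map Prod.fst with hheads
  have hheads_lt : heads.Pairwise (· < ·) := pv_gr_heads_lt sc hsc_pw
  have hheads_nodup : heads.Nodup := hheads_lt.imp ne_of_lt
  have hmem_heads : ∀ k, k ∈ heads ↔ k ∈ combine := by
    intro k; rw [hheads, pv_gr_mem, PySem.List.mem_sorted]
  have hperm2 : heads.Perm (PySem.Set.ofList combine) := by
    rw [List.perm_ext_iff_of_nodup hheads_nodup (PySem.Set.nodup_ofList _)]
    intro a; rw [hmem_heads, PySem.Set.mem_ofList]
  have hkeys_sorted : PySem.List.sorted (PySem.Set.ofList combine) (fun x => x) false = heads :=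
    PySem.List.sorted_eq_of_perm_of_pairwise_lt _ _ (fun x => x) hperm2 hheads_lt
  have hgcnt : ∀ p ∈ pvGroupRuns sc, p.2 = sc.count p.1 := pv_gr_count sc hsc_pw
  -- counts agree
  have hcA : (PySem.Set.ofList combine).countP (fun k => (combine.count k : Int) == 1)
      = (pvGroupRuns sc).countP (fun g => g.2 == 1) := by
    calc (PySem.Set.ofList combine).countP (fun k => (combine.count k : Int) == 1)
        = (PySem.Set.ofList combine).countP (fun k => sc.count k == 1) :=
          List.countP_congr (fun k _ => by
            simp only [hcount k, beq_iff_eq]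
            exact ⟨fun h => by exact_mod_cast h, fun h => by exact_mod_cast h⟩)
      _ = heads.countP (fun k => sc.count k == 1) := (hperm2.countP_eq _).symm
      _ = (pvGroupRuns sc).countP ((fun k => sc.count k == 1) ∘ Prod.fst) := List.countP_map ..
      _ = (pvGroupRuns sc).countP (fun g => g.2 == 1) :=
          List.countP_congr (fun g hg => by simp [Function.comp, hgcnt g hg])
  -- evaluate port A
  have hitems : (pvCountFrequency combine).items
      = (PySem.Set.ofList combine).map (fun k => (k, (combine.count k : Int))) := by
    rw [pvCountFrequency_eq_counter, PySem.Dict.items_counter]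
  have hall : ∀ p ∈ (pvCountFrequency combine).items, p.2 ≤ 2 := by
    rw [hitems]
    rintro p hp
    obtain ⟨k, hk, rfl⟩ := List.mem_map.mp hp
    have : combine.count k ≤ 2 := hcnt k (by rwa [← PySem.Set.mem_ofList])
    show (combine.count k : Int) ≤ 2
    exact_mod_cast this
  have hBall : (pvGroupRuns sc).all (fun g => g.2 ≤ 2) = true := by
    rw [List.all_eq_true]
    intro g hg
    have h1 : g.1 ∈ combine := (hmem_heads g.1).mp (List.mem_map_of_mem hg)
    simp only [decide_eq_true_eq]
    rw [hgcnt g hg, hcount g.1]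
    exact hcnt g.1 h1
  simp only [itemset_names_isValid, itemset_names_isValid_alt, hg0, hg1]
  rw [← hcomb, ← hsc]
  rw [pvSumFold _ _ hall]
  rw [hitems]
  simp only [List.countP_map]
  rw [show ((fun (p : String × Int) => p.2 == 1) ∘ fun k => (k, (combine.count k : Int)))
      = (fun k => (combine.count k : Int) == 1) from rfl]
  rw [hcA, List.map_map]
  rw [hBall]
  simp only [if_true]
  rw [show ((fun (kv : String × Int) => kv.1) ∘ fun k => (k, (combine.count k : Int))) = id from rfl]
  rw [List.map_id, hkeys_sorted]
  set c := (pvGroupRuns sc).countP (fun g => g.2 == 1) with hc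
  by_cases h2 : c = 2
  · simp [h2, hheads]
  · simp [h2]
    omega

-- ===== VERDICT (by name: the statement is the Claim_ definition above) =====
theorem itemset_names_isValid_spec : Claim_equal_itemset_names_isValid := by
  intro names _hdom hpre
  unfold Spec_itemset_names_isValid
  exact pv_main names hpre.1 hpre.2
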